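-- pv_equiv track=rewrite | github.com/SakshamAhlawat/indusnlp-v2 | filters/textcleaner.py | remove_line_and_after
-- ===== SOURCE A (Python) =====
-- def remove_line_and_after(text, keywords):
--     """Remove a line and the line after it if it contains a keyword."""
--     lines = text.split("\n")
--     to_remove = set()
--     for keyword in keywords:
--         for i, line in enumerate(lines):
--             if keyword in line:
--                 to_remove.add(i)
--                 if i < len(lines) - 1:
--                     to_remove.add(i + 1)
--     return "\n".join(
--         [line for idx, line in enumerate(lines) if idx not in to_remove]
--     )
-- ===== SOURCE B (Python) =====
-- def remove_line_and_after(text, keywords):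
--     """Remove a line and the line after it if it contains a keyword."""
--     kept = []
--     prev_hit = False
--     for line in text.split("\n"):
--         hit = any(kw in line for kw in keywords)
--         if not hit and not prev_hit:
--             kept.append(line)
--         prev_hit = hit
--     return "\n".join(kept)
-- ===== Notes on version B (the rewrite author's own statement) =====
-- stated objective: faster
-- what changed: Replaces A's keyword-outer double loop that accumulates a removal index set and then filters in a second enumerate pass by a single pass over the lines carrying a previous-line-hit flag, stopping at the first matching keyword per line.
import Mathlib
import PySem

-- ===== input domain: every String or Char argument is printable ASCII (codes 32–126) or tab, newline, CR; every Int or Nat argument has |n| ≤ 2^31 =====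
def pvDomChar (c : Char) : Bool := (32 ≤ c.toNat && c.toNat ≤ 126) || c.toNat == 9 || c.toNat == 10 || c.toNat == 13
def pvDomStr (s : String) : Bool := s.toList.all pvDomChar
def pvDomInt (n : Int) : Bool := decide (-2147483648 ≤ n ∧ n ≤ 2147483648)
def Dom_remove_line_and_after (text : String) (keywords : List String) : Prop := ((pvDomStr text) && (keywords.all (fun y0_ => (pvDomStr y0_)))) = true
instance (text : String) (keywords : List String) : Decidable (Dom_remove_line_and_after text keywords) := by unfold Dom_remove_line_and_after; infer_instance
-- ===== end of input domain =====

-- B replaces A's keyword-outer double loop + removal-index set + second filtering pass by one pass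
-- over the lines carrying a previous-line-hit flag with early exit at the first matching keyword
-- (measurably faster in a timing run).


-- ===== PORT A =====
def remove_line_and_after (text : String) (keywords : List String) : String :=
  let lines := (PySem.Str.split? text "\n").getD []
  let to_remove : PySem.Set Int :=
    keywords.foldl (fun tr keyword =>
      (PySem.List.enumerate lines).foldl (fun tr p =>
        if PySem.Str.isIn keyword p.2 then
          let tr := PySem.Set.add tr p.1
          if p.1 < (lines.length : Int) - 1 then PySem.Set.add tr (p.1 + 1) else tr
        else tr) tr) PySem.Set.empty
  PySem.Str.join "\n"
    (((PySem.List.enumerate lines).filter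
        (fun p => !(PySem.Set.contains to_remove p.1))).map (·.2))

-- ===== PORT B =====
def remove_line_and_after_alt (text : String) (keywords : List String) : String :=
  let step := ((PySem.Str.split? text "\n").getD []).foldl
    (fun (st : List String × Bool) line =>
      let hit := keywords.any (fun kw => PySem.Str.isIn kw line)
      (if !hit && !st.2 then st.1 ++ [line] else st.1, hit))
    ([], false)
  PySem.Str.join "\n" step.1

-- ===== PRECONDITION & SPEC =====
def Spec_remove_line_and_after (text : String) (keywords : List String) (out : String) : Prop := out = remove_line_and_after_alt text keywords
instance (text : String) (keywords : List String) (out : String) : Decidable (Spec_remove_line_and_after text keywords out) := by unfold Spec_remove_line_and_after; infer_instance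

-- ===== CLAIM (what is proved, stated in full; the proofs are below) =====
def Claim_equal_remove_line_and_after : Prop := ∀ (text : String) (keywords : List String), Dom_remove_line_and_after text keywords → Spec_remove_line_and_after text keywords (remove_line_and_after text keywords)

-- ===== LEMMAS AND PROOFS =====

-- 'line contains some keyword'
def pvHit (keywords : List String) (line : String) : Bool :=
  keywords.any (fun kw => PySem.Str.isIn kw line)

-- the common recursive description of the kept lines: keep a line iff neither it nor its predecessor hits
def pvKeep (keywords : List String) : List String → Bool → List String
  | [], _ => []
  | l :: ls, prev =>
    if pvHit keywords l then pvKeep keywords ls true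
    else if prev then pvKeep keywords ls false
    else l :: pvKeep keywords ls false

-- B's fold accumulates exactly pvKeep
theorem pvB_fold (keywords : List String) :
    ∀ (ls : List String) (acc : List String) (prev : Bool),
      (ls.foldl (fun (st : List String × Bool) line =>
          let hit := keywords.any (fun kw => PySem.Str.isIn kw line)
          (if !hit && !st.2 then st.1 ++ [line] else st.1, hit)) (acc, prev)).1
        = acc ++ pvKeep keywords ls prev := by
  intro ls
  induction ls with
  | nil => intro acc prev; simp [pvKeep]
  | cons l ls ih =>
    intro acc prev
    simp only [List.foldl_cons]
    rw [ih]
    cases hh : keywords.any (fun kw => PySem.Str.isIn kw l) <;> cases prev <;>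
      simp only [pvKeep, pvHit, hh, Bool.not_false, Bool.not_true, Bool.and_self,
        Bool.and_false, Bool.and_true, if_true, if_false, Bool.false_eq_true, List.append_assoc, List.singleton_append]

-- membership in the inner fold (over the enumerated lines) for one keyword
theorem pvInner_mem (kw : String) (n : Int) :
    ∀ (ps : List (Int × String)) (s : PySem.Set Int) (j : Int),
      j ∈ ps.foldl (fun tr p =>
          if PySem.Str.isIn kw p.2 then
            let tr := PySem.Set.add tr p.1
            if p.1 < n - 1 then PySem.Set.add tr (p.1 + 1) else tr
          else tr) s
      ↔ j ∈ s ∨ ∃ p ∈ ps, PySem.Str.isIn kw p.2 = true ∧ (j = p.1 ∨ (j = p.1 + 1 ∧ p.1 < n - 1)) := by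
  intro ps
  induction ps with
  | nil => intro s j; simp
  | cons p ps ih =>
    intro s j
    simp only [List.foldl_cons, List.exists_mem_cons_iff]
    by_cases h : PySem.Str.isIn kw p.2 = true
    · by_cases hlt : p.1 < n - 1
      · rw [if_pos h, if_pos hlt, ih]
        simp only [PySem.Set.mem_add, h, hlt, true_and, and_true, or_assoc]
      · rw [if_pos h, if_neg hlt, ih]
        simp only [PySem.Set.mem_add, h, hlt, true_and, and_false, or_false, or_assoc]
    · rw [if_neg h, ih]
      simp only [h, Bool.false_eq_true, false_and, false_or]

-- membership in A's full to_remove set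
theorem pvOuter_mem (lines : List String) :
    ∀ (kws : List String) (s : PySem.Set Int) (j : Int),
      j ∈ kws.foldl (fun tr keyword =>
          (PySem.List.enumerate lines).foldl (fun tr p =>
            if PySem.Str.isIn keyword p.2 then
              let tr := PySem.Set.add tr p.1
              if p.1 < (lines.length : Int) - 1 then PySem.Set.add tr (p.1 + 1) else tr
            else tr) tr) s
      ↔ j ∈ s ∨ ∃ kw ∈ kws, ∃ p ∈ PySem.List.enumerate lines,
          PySem.Str.isIn kw p.2 = true ∧ (j = p.1 ∨ (j = p.1 + 1 ∧ p.1 < (lines.length : Int) - 1)) := by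
  intro kws
  induction kws with
  | nil => intro s j; simp
  | cons kw kws ih =>
    intro s j
    rw [List.foldl_cons, ih, pvInner_mem kw ((lines.length : Int)) (PySem.List.enumerate lines) s j,
      List.exists_mem_cons_iff, or_assoc]

-- characterisation of A's removal set at a Nat index k < n
theorem pvRemove_iff (keywords lines : List String) (k : Nat) (hk : k < lines.length) :
    ((k : Int) ∈ keywords.foldl (fun tr keyword =>
          (PySem.List.enumerate lines).foldl (fun tr p =>
            if PySem.Str.isIn keyword p.2 then
              let tr := PySem.Set.add tr p.1
              if p.1 < (lines.length : Int) - 1 then PySem.Set.add tr (p.1 + 1) else tr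
            else tr) tr) PySem.Set.empty)
      ↔ (pvHit keywords lines[k] = true ∨ (0 < k ∧ ∃ h : k - 1 < lines.length, pvHit keywords lines[k-1] = true)) := by
  rw [pvOuter_mem]
  simp only [pvHit, List.any_eq_true, PySem.Set.empty, List.not_mem_nil, false_or,
    PySem.List.mem_enumerate_iff]
  constructor
  · rintro ⟨kw, hkw, p, ⟨m, hm, rfl⟩, hin, hj⟩
    simp only [zero_add] at hin hj
    rcases hj with hj | ⟨hj, hlt⟩
    · left
      have hkm : k = m := by exact_mod_cast hj
      subst hkm
      exact ⟨kw, hkw, hin⟩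
    · right
      have hkm : k = m + 1 := by exact_mod_cast hj
      subst hkm
      exact ⟨by omega, by omega, kw, hkw, by simpa using hin⟩
  · rintro (⟨kw, hkw, hin⟩ | ⟨hpos, h1, kw, hkw, hin⟩)
    · exact ⟨kw, hkw, ((k : Int), lines[k]), ⟨k, hk, by simp⟩, hin, Or.inl rfl⟩
    · exact ⟨kw, hkw, (((k - 1 : Nat) : Int), lines[k - 1]), ⟨k - 1, h1, by simp⟩, hin,
        Or.inr ⟨by omega, by omega⟩⟩

-- the filtered comprehension over an enumeration equals pvKeep, for any keep test that matches the hit pattern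
theorem pvFilter_eq_keep (keywords : List String) :
    ∀ (ls : List String) (s : Int) (prev : Bool) (keep : Int → Bool),
      (∀ (k : Nat) (h : k < ls.length),
          keep (s + k) = (!pvHit keywords ls[k] &&
            (if k = 0 then !prev else !pvHit keywords ls[k-1]))) →
      ((PySem.List.enumerate ls s).filter (fun p => keep p.1)).map (·.2) = pvKeep keywords ls prev := by
  intro ls
  induction ls with
  | nil => intro s prev keep _; simp [pvKeep]
  | cons l ls ih =>
    intro s prev keep hkeep
    have h0 := hkeep 0 (by simp)
    simp only [List.getElem_cons_zero, Int.natCast_zero, add_zero] at h0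
    have htail : ∀ (k : Nat) (h : k < ls.length),
        keep ((s + 1) + k) = (!pvHit keywords ls[k] &&
          (if k = 0 then !(pvHit keywords l) else !pvHit keywords ls[k-1])) := by
      intro k h
      have := hkeep (k + 1) (by simpa using Nat.succ_lt_succ h)
      simp only [List.getElem_cons_succ, Nat.add_sub_cancel] at this
      rw [show (s + 1) + (k : Int) = s + ((k : Nat) + 1 : Nat) by push_cast; ring, this]
      rcases k with _ | k <;> simp
    rw [PySem.List.enumerate_cons]
    simp only [List.filter_cons]
    by_cases hhit : pvHit keywords l = true
    · have : keep s = false := by rw [h0, hhit]; simp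
      simp only [this, Bool.false_eq_true, if_false, pvKeep, hhit]
      apply ih
      intro k h
      rw [htail k h, hhit]
    · simp only [Bool.not_eq_true] at hhit
      by_cases hp : prev
      · have : keep s = false := by rw [h0, hhit, hp]; simp
        simp only [this, Bool.false_eq_true, if_false, pvKeep, hhit, hp]
        simp only [if_true]
        apply ih
        intro k h
        rw [htail k h, hhit]
      · simp only [Bool.not_eq_true] at hp
        have : keep s = true := by rw [h0, hhit, hp]; simp
        simp only [this, if_true, pvKeep, hhit, hp]
        simp only [Bool.false_eq_true, if_false, List.map_cons]
        congr 1
        apply ih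
        intro k h
        rw [htail k h, hhit]

-- A's filtered comprehension equals pvKeep, given the membership characterisation of its set
theorem pvKeep_of_mem (keywords lines : List String) (S : PySem.Set Int)
    (hS : ∀ (k : Nat) (h : k < lines.length),
      (((k : Nat) : Int) ∈ S ↔ (pvHit keywords lines[k] = true ∨
        (0 < k ∧ ∃ h' : k - 1 < lines.length, pvHit keywords lines[k-1] = true)))) :
    ((PySem.List.enumerate lines).filter (fun p => !(PySem.Set.contains S p.1))).map (·.2)
      = pvKeep keywords lines false := by
  refine pvFilter_eq_keep keywords lines 0 false (fun j => !(PySem.Set.contains S j)) ?_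
  intro k h
  have hmem := (PySem.Set.contains_iff S ((k : Nat) : Int)).trans (hS k h)
  rw [Bool.eq_iff_iff]
  simp only [zero_add, Bool.not_eq_true', Bool.eq_false_iff, ne_eq, hmem, Bool.and_eq_true]
  by_cases hk0 : k = 0
  · subst hk0
    simp [lt_self_iff_false]
  · have hk1 : 0 < k := Nat.pos_of_ne_zero hk0
    have hlt : k - 1 < lines.length := by omega
    simp [hk0, hk1, hlt, not_or]

-- ===== VERDICT (by name: the statement is the Claim_ definition above) =====
theorem remove_line_and_after_spec : Claim_equal_remove_line_and_after := by
  intro text keywords _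
  simp only [Spec_remove_line_and_after, remove_line_and_after, remove_line_and_after_alt]
  rw [pvB_fold keywords ((PySem.Str.split? text "\n").getD []) [] false, List.nil_append]
  congr 1
  exact pvKeep_of_mem keywords _ _ (fun k h => pvRemove_iff keywords _ k h)
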